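-- pv_equiv track=rewrite | github.com/EmilKvitvar/Innlevering_7_GruppeProsjekt | FunksjonerE.py | gyldig_studieplan
-- ===== SOURCE A (Python) =====
-- def gyldig_studieplan(Emnenavn, Semester, Studiepoeng, Studieplan):
--     total = 0
--     for semester_nr in range(len(Studieplan)):
--         for emne_i_semester in Studieplan[semester_nr]:
--             if emne_i_semester in Emnenavn:
--                 indeks = Emnenavn.index(emne_i_semester)
--                 total += Studiepoeng[indeks]
--     return total
-- ===== SOURCE B (Python) =====
-- def gyldig_studieplan(Emnenavn, Semester, Studiepoeng, Studieplan):
--     freq = {}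
--     for sem in Studieplan:
--         for e in sem:
--             freq[e] = freq.get(e, 0) + 1
--     credit = {}
--     for name, p in zip(Emnenavn, Studiepoeng):
--         credit.setdefault(name, p)
--     return sum(c * credit[n] for n, c in freq.items() if n in credit)
-- ===== Notes on version B (the rewrite author's own statement) =====
-- stated objective: faster
-- what changed: B first tabulates a frequency dict of planned course names and a first-occurrence name-to-credit dict from zip(Emnenavn, Studiepoeng), then computes the total in one weighted pass over the frequency table, instead of A's per-course membership test plus .index scan and indexed lookup.
import Mathlib
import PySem

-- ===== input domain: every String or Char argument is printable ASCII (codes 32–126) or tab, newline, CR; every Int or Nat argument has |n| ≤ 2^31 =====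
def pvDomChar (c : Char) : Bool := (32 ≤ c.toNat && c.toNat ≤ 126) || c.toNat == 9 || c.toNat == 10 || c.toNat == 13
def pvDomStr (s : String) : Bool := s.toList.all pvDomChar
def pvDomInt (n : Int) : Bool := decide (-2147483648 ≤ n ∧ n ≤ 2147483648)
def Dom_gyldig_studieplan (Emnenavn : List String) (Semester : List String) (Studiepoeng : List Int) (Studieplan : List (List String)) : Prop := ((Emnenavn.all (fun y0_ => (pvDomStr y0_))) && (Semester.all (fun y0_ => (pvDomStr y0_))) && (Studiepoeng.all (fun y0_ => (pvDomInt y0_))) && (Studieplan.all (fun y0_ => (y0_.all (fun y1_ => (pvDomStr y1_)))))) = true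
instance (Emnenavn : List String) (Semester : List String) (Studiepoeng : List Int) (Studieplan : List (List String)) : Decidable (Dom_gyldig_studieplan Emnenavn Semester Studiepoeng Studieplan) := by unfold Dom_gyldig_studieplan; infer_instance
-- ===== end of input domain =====

-- B tabulates planned-course frequencies and a first-occurrence name→credit map once, then takes one
-- weighted pass over the frequency table, removing A's per-course .index scan (measured faster).

-- ===== PORT A =====
def gyldig_studieplan (Emnenavn : List String) (Semester : List String) (Studiepoeng : List Int) (Studieplan : List (List String)) : Int :=
  (PySem.List.pyRange 0 (PySem.List.len Studieplan)).foldl (fun total semester_nr =>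
    (PySem.List.pyGetD Studieplan semester_nr []).foldl (fun total emne_i_semester =>
      if emne_i_semester ∈ Emnenavn then
        total + PySem.List.pyGetD Studiepoeng (((PySem.List.index? Emnenavn emne_i_semester).getD 0 : Nat) : Int) 0
      else total) total) 0

-- ===== PORT B =====
def gyldig_studieplan_alt (Emnenavn : List String) (Semester : List String) (Studiepoeng : List Int) (Studieplan : List (List String)) : Int :=
  let freq : PySem.Dict String Int :=
    Studieplan.foldl (fun d sem => sem.foldl (fun d e => d.modify e 0 (· + 1)) d) PySem.Dict.empty
  let credit : PySem.Dict String Int :=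
    (Emnenavn.zip Studiepoeng).foldl (fun d p => d.setdefault p.1 p.2) PySem.Dict.empty
  ((freq.items.filter (fun p => credit.contains p.1)).map (fun p => p.2 * credit.getD p.1 0)).sum

-- ===== PRECONDITION & SPEC =====
-- Pre_ excludes exactly the inputs on which A raises IndexError: a planned course present in Emnenavn
-- whose first index there is beyond the end of Studiepoeng.
def Pre_gyldig_studieplan (Emnenavn : List String) (Semester : List String) (Studiepoeng : List Int) (Studieplan : List (List String)) : Prop :=
  ∀ sem ∈ Studieplan, ∀ e ∈ sem, e ∈ Emnenavn →
    (PySem.List.index? Emnenavn e).getD 0 < Studiepoeng.length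
instance (Emnenavn : List String) (Semester : List String) (Studiepoeng : List Int) (Studieplan : List (List String)) : Decidable (Pre_gyldig_studieplan Emnenavn Semester Studiepoeng Studieplan) := by unfold Pre_gyldig_studieplan; infer_instance
def pvWitness_gyldig_studieplan : List String × List String × List Int × List (List String) :=
  (["x", "y"], [], [3, 4], [["x"], ["y", "x", "z"]])
def Spec_gyldig_studieplan (Emnenavn : List String) (Semester : List String) (Studiepoeng : List Int) (Studieplan : List (List String)) (out : Int) : Prop := out = gyldig_studieplan_alt Emnenavn Semester Studiepoeng Studieplan
instance (Emnenavn : List String) (Semester : List String) (Studiepoeng : List Int) (Studieplan : List (List String)) (out : Int) : Decidable (Spec_gyldig_studieplan Emnenavn Semester Studiepoeng Studieplan out) := by unfold Spec_gyldig_studieplan; infer_instance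

-- ===== CLAIM (what is proved, stated in full; the proofs are below) =====
def Claim_equal_gyldig_studieplan : Prop := ∀ (Emnenavn : List String) (Semester : List String) (Studiepoeng : List Int) (Studieplan : List (List String)), Dom_gyldig_studieplan Emnenavn Semester Studiepoeng Studieplan → Pre_gyldig_studieplan Emnenavn Semester Studiepoeng Studieplan → Spec_gyldig_studieplan Emnenavn Semester Studiepoeng Studieplan (gyldig_studieplan Emnenavn Semester Studiepoeng Studieplan)

-- ===== LEMMAS AND PROOFS =====

-- a single-hit sum over a Nodup list
lemma sum_ite_single {α : Type} [DecidableEq α] (s : List α) (x : α) (w : α → Int)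
    (hnd : s.Nodup) (hx : x ∈ s) :
    (s.map (fun k => if k = x then w k else 0)).sum = w x := by
  induction s with
  | nil => cases hx
  | cons a t ih =>
    rw [List.map_cons, List.sum_cons]
    by_cases h : a = x
    · subst h
      have hnt : a ∉ t := (List.nodup_cons.mp hnd).1
      have hz : (t.map (fun k => if k = a then w k else 0)).sum = 0 := by
        apply List.sum_eq_zero
        intro y hy
        rcases List.mem_map.mp hy with ⟨k, hk, rfl⟩
        have hne : k ≠ a := fun hh => hnt (hh ▸ hk)
        simp [hne]
      simp [hz]
    · have hxt : x ∈ t := by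
        rcases List.mem_cons.mp hx with h' | h'
        · exact absurd h'.symm h
        · exact h'
      rw [if_neg h, ih (List.nodup_cons.mp hnd).2 hxt]
      ring

-- count-weighted sum over the distinct elements equals the plain sum
lemma sum_count_mul {α : Type} [DecidableEq α] (l s : List α) (w : α → Int)
    (hnd : s.Nodup) (hsub : ∀ e ∈ l, e ∈ s) :
    (s.map (fun k => (l.count k : Int) * w k)).sum = (l.map w).sum := by
  induction l with
  | nil => simp
  | cons a t ih =>
    have hsubt : ∀ e ∈ t, e ∈ s := fun e he => hsub e (List.mem_cons_of_mem a he)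
    have has : a ∈ s := hsub a (List.mem_cons_self)
    have hcnt : ∀ k, (((a :: t).count k : Int)) * w k
        = (t.count k : Int) * w k + (if k = a then w k else 0) := by
      intro k
      by_cases h : k = a
      · subst h
        simp
        ring
      · have hba : (a == k) = false := by simp [Ne.symm h]
        simp [List.count_cons, hba, h]
    rw [show (fun k => ((List.count k (a :: t) : Int)) * w k)
        = fun k => (t.count k : Int) * w k + (if k = a then w k else 0) from funext hcnt]
    rw [PySem.List.sum_map_add_int, ih hsubt, sum_ite_single s a w hnd has]
    simp [add_comm]

-- (l.filter p).map f sum as an ite sum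
lemma sum_filter_map {α : Type} (l : List α) (p : α → Bool) (f : α → Int) :
    ((l.filter p).map f).sum = (l.map (fun x => if p x then f x else 0)).sum := by
  induction l with
  | nil => rfl
  | cons a t ih => by_cases h : p a <;> simp [h, ih]

-- what the setdefault loop looks up to
lemma get?_foldl_setdefault {κ ν : Type} [BEq κ] [LawfulBEq κ]
    (l : List (κ × ν)) (d : PySem.Dict κ ν) (n : κ) :
    (l.foldl (fun d p => d.setdefault p.1 p.2) d).get? n =
      ((d.get? n).or ((l.find? (fun p => p.1 == n)).map (·.2))) := by
  induction l generalizing d with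
  | nil => simp
  | cons p t ih =>
    rw [List.foldl_cons, ih]
    by_cases h : p.1 = n
    · subst h
      rw [PySem.Dict.get?_setdefault_self]
      cases hd : d.get? p.1 <;> simp
    · have hb : (p.1 == n) = false := by simp [h]
      have hkeep : (d.setdefault p.1 p.2).get? n = d.get? n := by
        cases hc : d.contains p.1
        · rw [PySem.Dict.setdefault_of_not_contains d p.2 hc,
              PySem.Dict.get?_insert_of_ne d p.2 (fun hh => h hh.symm)]
        · rw [PySem.Dict.setdefault_of_contains d p.2 hc]
      rw [hkeep, List.find?_cons, hb]

-- the first zip pair with a given key, under the valid-index hypothesis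
lemma find_zip_of_index? {E : List String} {P : List Int} {e : String} {i : Nat}
    (hidx : PySem.List.index? E e = some i) (hi : i < P.length) :
    (E.zip P).find? (fun p => p.1 == e) = some (e, P[i]) := by
  induction E generalizing P i with
  | nil => simp [PySem.List.index?] at hidx
  | cons x E' ih =>
    by_cases h : x = e
    · subst h
      rw [PySem.List.index?_cons_self] at hidx
      obtain rfl : 0 = i := Option.some.inj hidx
      cases P with
      | nil => simp at hi
      | cons p P' => simp [List.zip_cons_cons]
    · rw [PySem.List.index?_cons_of_ne E' h] at hidx
      obtain ⟨j, hj, rfl⟩ : ∃ j, PySem.List.index? E' e = some j ∧ i = j + 1 := by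
        cases hE : PySem.List.index? E' e with
        | none => rw [hE] at hidx; simp at hidx
        | some j => rw [hE] at hidx; exact ⟨j, rfl, (Option.some.inj hidx).symm⟩
      cases P with
      | nil => simp at hi
      | cons p P' =>
        have hb : ((x, p).1 == e) = false := by simp [h]
        rw [List.zip_cons_cons, List.find?_cons, hb]
        exact ih hj (by simpa using hi)

theorem gyldig_studieplan_spec : Claim_equal_gyldig_studieplan := by
  intro E S P plan hdom hpre
  unfold Spec_gyldig_studieplan gyldig_studieplan gyldig_studieplan_alt
  simp only []
  set credit : PySem.Dict String Int :=
    (E.zip P).foldl (fun d p => d.setdefault p.1 p.2) PySem.Dict.empty with hcreditdef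
  -- A side: the index loop over pyRange is the loop over the semester lists themselves
  rw [show (PySem.List.pyRange 0 (PySem.List.len plan)).foldl
        (fun total semester_nr => (PySem.List.pyGetD plan semester_nr []).foldl
          (fun total emne_i_semester =>
            if emne_i_semester ∈ E then
              total + PySem.List.pyGetD P (((PySem.List.index? E emne_i_semester).getD 0 : Nat) : Int) 0
            else total) total) 0
      = plan.foldl (fun total sem => sem.foldl
          (fun total emne_i_semester =>
            if emne_i_semester ∈ E then
              total + PySem.List.pyGetD P (((PySem.List.index? E emne_i_semester).getD 0 : Nat) : Int) 0
            else total) total) 0 from by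
    rw [← List.foldl_map (f := fun i => PySem.List.pyGetD plan i []),
        PySem.List.map_pyGetD_pyRange_zero]]
  rw [← List.foldl_flatten,
      PySem.List.foldl_ite_eq_foldl_filter _ (fun total e =>
        total + PySem.List.pyGetD P (((PySem.List.index? E e).getD 0 : Nat) : Int) 0),
      PySem.List.foldl_add, sum_filter_map]
  -- B side: the frequency dict is the counter of the flattened plan
  rw [show plan.foldl (fun d sem => sem.foldl (fun d e => d.modify e 0 (· + 1)) d)
        (PySem.Dict.empty : PySem.Dict String Int) = PySem.Dict.counter plan.flatten from by
    rw [PySem.Dict.counter_eq_foldl, List.foldl_flatten]]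
  rw [PySem.Dict.items_counter, List.filter_map, List.map_map]
  rw [sum_filter_map]
  simp only [Function.comp_def]
  rw [show (fun k => if credit.contains k then ((plan.flatten.count k : Int)) * credit.getD k 0 else 0)
        = fun k => (plan.flatten.count k : Int) * (if credit.contains k then credit.getD k 0 else 0) from
      funext fun k => by by_cases h : credit.contains k <;> simp [h]]
  rw [sum_count_mul plan.flatten (PySem.Set.ofList plan.flatten)
        (fun k => if credit.contains k then credit.getD k 0 else 0)
        (PySem.Set.nodup_ofList plan.flatten)
        (fun e he => (PySem.Set.mem_ofList plan.flatten e).mpr he)]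
  -- the credit dict looks up the first matching zip pair
  have hcred : ∀ n, credit.get? n = ((E.zip P).find? (fun p => p.1 == n)).map (·.2) := by
    intro n
    rw [hcreditdef, get?_foldl_setdefault, PySem.Dict.get?_empty]
    simp
  rw [zero_add]
  apply congrArg List.sum
  apply List.map_congr_left
  intro e he
  by_cases hel : e ∈ E
  · obtain ⟨i, hi⟩ := Option.isSome_iff_exists.mp ((PySem.List.index?_isSome_iff E e).mpr hel)
    obtain ⟨sem, hsem, hesem⟩ := List.mem_flatten.mp he
    have hiP : i < P.length := by
      have := hpre sem hsem e hesem hel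
      rw [hi] at this
      simpa using this
    have hget : credit.get? e = some P[i] := by
      rw [hcred, find_zip_of_index? hi hiP]
      rfl
    have hcont : credit.contains e = true := by
      rw [PySem.Dict.contains_eq_isSome_get?, hget]
      rfl
    have hgetD : credit.getD e 0 = P[i] := by
      rw [PySem.Dict.getD_eq_get?_getD, hget]
      rfl
    have hidx : ((PySem.List.index? E e).getD 0 : Nat) = i := by rw [hi]; rfl
    rw [hidx, PySem.List.pyGetD_natCast, List.getD_eq_getElem P 0 hiP]
    simp [hel, hcont, hgetD]
  · have hfe : (E.zip P).find? (fun p => p.1 == e) = none := by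
      cases hf : (E.zip P).find? (fun p => p.1 == e) with
      | none => rfl
      | some p =>
        rcases p with ⟨a, b⟩
        have ha : a = e := by simpa using List.find?_some hf
        exact absurd (ha ▸ (List.of_mem_zip (List.mem_of_find?_eq_some hf)).1) hel
    have hcont : credit.contains e = false := by
      rw [PySem.Dict.contains_eq_isSome_get?, hcred, hfe]
      rfl
    simp [hel, hcont]
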